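-- pv_equiv track=rewrite | github.com/DonaldHartley/Codecadmey_git | Abruptly Goblins Planner.py | find_best_night
-- ===== SOURCE A (Python) =====
-- def find_best_night(availability_lst):
--     best_count = max(list(availability_lst.values()))
--     if list(availability_lst.values()).count(best_count) > 1:
--         days=[]
--         for day, count in availability_lst.items():
--             if count == best_count:
--                 days.append(day)
--         return days, best_count
--     elif list(availability_lst.values()).count(best_count) == 1:
--         for day, count in availability_lst.items():
--             if count == best_count:
--                 return [day], best_count
-- ===== SOURCE B (Python) =====
-- def find_best_night(availability_lst):
--     if not availability_lst:
--         raise ValueError("max() arg is an empty sequence")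
--     best_count = None
--     days = []
--     for day, count in availability_lst.items():
--         if best_count is None or count > best_count:
--             best_count = count
--             days = [day]
--         elif count == best_count:
--             days.append(day)
--     return days, best_count
-- ===== Notes on version B (the rewrite author's own statement) =====
-- stated objective: simpler
-- what changed: B replaces A's three passes (max over values, count of the max, then a collect-or-first-match loop split into two branches) by one pass that maintains the running maximum and resets/extends the day list as it goes.
-- outside the precondition, e.g. on find_best_night({}): A raises ValueError, B raises ValueError
import Mathlib
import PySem

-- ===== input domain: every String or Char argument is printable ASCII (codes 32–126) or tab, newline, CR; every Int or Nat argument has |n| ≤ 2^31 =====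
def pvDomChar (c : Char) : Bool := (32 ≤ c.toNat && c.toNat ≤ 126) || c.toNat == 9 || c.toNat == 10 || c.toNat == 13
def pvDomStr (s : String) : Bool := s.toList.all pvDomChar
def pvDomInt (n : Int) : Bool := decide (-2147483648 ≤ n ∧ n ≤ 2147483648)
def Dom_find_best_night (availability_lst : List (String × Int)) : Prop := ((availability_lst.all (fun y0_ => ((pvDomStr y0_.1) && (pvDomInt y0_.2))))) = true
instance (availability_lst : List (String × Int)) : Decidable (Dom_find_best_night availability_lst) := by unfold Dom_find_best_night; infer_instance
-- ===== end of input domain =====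

-- B fuses A's separate max / count / collect passes into a single pass keeping the running maximum and day list; same results, simpler shape.


-- ===== PORT A =====
-- helper for A's second loop: returns on the FIRST day whose count equals best
-- (if no day matches, Python falls off the function and returns None — unreachable
-- when the count of best is 1; the ([], 0) default stands for that).
def pvAFirst (l : List (String × Int)) (best : Int) : List String × Int :=
  match l with
  | [] => ([], 0)
  | p :: t => if p.2 = best then ([p.1], best) else pvAFirst t best

def find_best_night (availability_lst : List (String × Int)) : List String × Int :=
  match PySem.List.max? (availability_lst.map Prod.snd) (fun v => v) with
  | none => ([], 0)   -- Python: max([]) raises ValueError (excluded by Pre_)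
  | some best_count =>
    if (availability_lst.map Prod.snd).count best_count > 1 then
      (availability_lst.foldl (fun days p => if p.2 = best_count then days ++ [p.1] else days) [],
       best_count)
    else if (availability_lst.map Prod.snd).count best_count = 1 then
      pvAFirst availability_lst best_count
    else ([], 0)      -- Python: falls off, returns None (unreachable)

-- ===== PORT B =====
-- one step of B's single pass: new strict maximum resets the day list, a tie appends
def pvBStep (st : Option Int × List String) (p : String × Int) : Option Int × List String :=
  match st.1 with
  | none => (some p.2, [p.1])
  | some b => if p.2 > b then (some p.2, [p.1])
              else if p.2 = b then (some b, st.2 ++ [p.1])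
              else st

def find_best_night_alt (availability_lst : List (String × Int)) : List String × Int :=
  if availability_lst = [] then ([], 0)   -- Python B raises ValueError here (excluded by Pre_)
  else
    match availability_lst.foldl pvBStep (none, []) with
    | (some b, days) => (days, b)
    | (none, _) => ([], 0)                -- unreachable: the list is nonempty

-- ===== PRECONDITION & SPEC =====
-- Pre_ excludes the empty dict, where A's max() raises ValueError (B raises the same), and
-- lists with duplicate keys, which do not represent any Python dict (last-key-wins collapse
-- makes the association-list reading ambiguous).
def Pre_find_best_night (availability_lst : List (String × Int)) : Prop :=
  availability_lst ≠ [] ∧ (availability_lst.map Prod.fst).Nodup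
instance (availability_lst : List (String × Int)) : Decidable (Pre_find_best_night availability_lst) := by unfold Pre_find_best_night; infer_instance

def pvWitness_find_best_night : (List (String × Int)) := [("monday", 2), ("tuesday", 3), ("friday", 3)]

def Spec_find_best_night (availability_lst : List (String × Int)) (out : List String × Int) : Prop := out = find_best_night_alt availability_lst
instance (availability_lst : List (String × Int)) (out : List String × Int) : Decidable (Spec_find_best_night availability_lst out) := by unfold Spec_find_best_night; infer_instance

-- ===== CLAIM (what is proved, stated in full; the proofs are below) =====
def Claim_equal_find_best_night : Prop := ∀ (availability_lst : List (String × Int)), Dom_find_best_night availability_lst → Pre_find_best_night availability_lst → Spec_find_best_night availability_lst (find_best_night availability_lst)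

-- ===== LEMMAS AND PROOFS =====

-- the days both programs end up with: all days whose count equals m, in order
def pvMatches (l : List (String × Int)) (m : Int) : List String :=
  (l.filter (fun p => p.2 = m)).map Prod.fst

lemma pvMatches_cons (p : String × Int) (t : List (String × Int)) (m : Int) :
    pvMatches (p :: t) m = (if p.2 = m then [p.1] else []) ++ pvMatches t m := by
  by_cases h : p.2 = m <;> simp [pvMatches, h]

-- B's fold from a live state: reaches the overall max, and the day list is the
-- matches of the whole prefix (ds if the old best survives, discarded otherwise)
lemma pvBfold (l : List (String × Int)) (b : Int) (ds : List String) :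
    l.foldl pvBStep (some b, ds) =
      (some ((l.map Prod.snd).foldl max b),
       (if b < (l.map Prod.snd).foldl max b then [] else ds)
         ++ pvMatches l ((l.map Prod.snd).foldl max b)) := by
  induction l generalizing b ds with
  | nil => simp [pvMatches]
  | cons p t ih =>
    have hle : ∀ (x : Int) (xs : List Int), x ≤ xs.foldl max x := by
      intro x xs
      induction xs generalizing x with
      | nil => exact le_refl x
      | cons y ys ihy => exact le_trans (le_max_left x y) (ihy (max x y))
    simp only [List.foldl_cons, List.map_cons, pvMatches_cons]
    by_cases h1 : p.2 > b
    · have hmax : max b p.2 = p.2 := max_eq_right (le_of_lt h1)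
      rw [show pvBStep (some b, ds) p = (some p.2, [p.1]) by simp [pvBStep, h1]]
      rw [ih p.2 [p.1]]; simp only [hmax]
      have hble : b < (t.map Prod.snd).foldl max p.2 :=
        lt_of_lt_of_le h1 (hle p.2 (t.map Prod.snd))
      by_cases h2 : p.2 < (t.map Prod.snd).foldl max p.2
      · simp [h2, hble, ne_of_lt h2]
      · have : p.2 = (t.map Prod.snd).foldl max p.2 :=
          le_antisymm (hle p.2 (t.map Prod.snd)) (le_of_not_gt h2)
        simp [← this, h1]
    · have hmax : max b p.2 = b := max_eq_left (le_of_not_gt h1)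
      by_cases h2 : p.2 = b
      · rw [show pvBStep (some b, ds) p = (some b, ds ++ [p.1]) by simp [pvBStep, h2]]
        rw [ih b (ds ++ [p.1])]; simp only [hmax]
        by_cases h3 : b < (t.map Prod.snd).foldl max b
        · simp [h3, h2, ne_of_lt h3]
        · have : b = (t.map Prod.snd).foldl max b :=
            le_antisymm (hle b (t.map Prod.snd)) (le_of_not_gt h3)
          simp [h2, ← this]
      · rw [show pvBStep (some b, ds) p = (some b, ds) by simp [pvBStep, h1, h2]]
        rw [ih b ds]; simp only [hmax]
        by_cases h3 : b < (t.map Prod.snd).foldl max b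
        · have : p.2 ≠ (t.map Prod.snd).foldl max b :=
            ne_of_lt (lt_of_le_of_lt (le_of_not_gt h1) h3)
          simp [h3, this]
        · have hb : b = (t.map Prod.snd).foldl max b :=
            le_antisymm (hle b (t.map Prod.snd)) (le_of_not_gt h3)
          have : p.2 ≠ (t.map Prod.snd).foldl max b := fun he => h2 (he.trans hb.symm)
          simp [h3, this]

-- B on a nonempty list returns (matches, max)
lemma pvB_eq (p : String × Int) (t : List (String × Int)) :
    find_best_night_alt (p :: t) =
      (pvMatches (p :: t) ((t.map Prod.snd).foldl max p.2),
       (t.map Prod.snd).foldl max p.2) := by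
  have hstep : pvBStep (none, ([] : List String)) p = (some p.2, [p.1]) := rfl
  have hle : ∀ (x : Int) (xs : List Int), x ≤ xs.foldl max x := by
    intro x xs
    induction xs generalizing x with
    | nil => exact le_refl x
    | cons y ys ihy => exact le_trans (le_max_left x y) (ihy (max x y))
  simp only [find_best_night_alt, List.foldl_cons, hstep, pvBfold]
  rw [pvMatches_cons]
  by_cases h : p.2 < (t.map Prod.snd).foldl max p.2
  · simp [h, ne_of_lt h]
  · have he : p.2 = (t.map Prod.snd).foldl max p.2 :=
      le_antisymm (hle p.2 (t.map Prod.snd)) (le_of_not_gt h)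
    simp [← he]

-- A's collect loop builds exactly the matches
lemma pvAcollect (l : List (String × Int)) (m : Int) (acc : List String) :
    l.foldl (fun days p => if p.2 = m then days ++ [p.1] else days) acc
      = acc ++ pvMatches l m := by
  induction l generalizing acc with
  | nil => simp [pvMatches]
  | cons p t ih =>
    rw [List.foldl_cons, pvMatches_cons]
    by_cases h : p.2 = m <;> simp [h, ih]

-- count of m among the values = length of the matches
lemma pvCount_eq (l : List (String × Int)) (m : Int) :
    (l.map Prod.snd).count m = (pvMatches l m).length := by
  induction l with
  | nil => rfl
  | cons p t ih =>
    rw [List.map_cons, pvMatches_cons]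
    by_cases h : p.2 = m
    · simp [h, ih]
    · simp [h, ih]

-- when the matches start with d, A's first-match loop returns ([d], m)
lemma pvAFirst_eq (l : List (String × Int)) (m : Int) (d : String) (rest : List String)
    (h : pvMatches l m = d :: rest) : pvAFirst l m = ([d], m) := by
  induction l with
  | nil => simp [pvMatches] at h
  | cons p t ih =>
    rw [pvMatches_cons] at h
    by_cases hp : p.2 = m
    · simp [hp] at h
      simp [pvAFirst, hp, h.1]
    · simp [hp] at h
      simp [pvAFirst, hp, ih h]

-- ===== VERDICT (by name: the statement is the Claim_ definition above) =====
theorem find_best_night_spec : Claim_equal_find_best_night := by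
  intro l _ hpre
  obtain ⟨hne, _⟩ := hpre
  match l with
  | [] => exact absurd rfl hne
  | p :: t =>
    show find_best_night (p :: t) = find_best_night_alt (p :: t)
    rw [pvB_eq]
    set m := (t.map Prod.snd).foldl max p.2 with hm
    have hmax : PySem.List.max? ((p :: t).map Prod.snd) (fun v => v) = some m := by
      rw [List.map_cons, PySem.List.max?_id_cons]
    rw [find_best_night, hmax]
    have hne' : pvMatches (p :: t) m ≠ [] := by
      have hv : m ∈ (p :: t).map Prod.snd := by
        have := PySem.List.max?_mem hmax; simpa using this
      rcases List.mem_map.mp hv with ⟨q, hq, hvq⟩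
      have : q.1 ∈ pvMatches (p :: t) m :=
        List.mem_map.mpr ⟨q, List.mem_filter.mpr ⟨hq, by simp [hvq]⟩, rfl⟩
      exact fun he => by simp [he] at this
    simp only [pvCount_eq]
    match hml : pvMatches (p :: t) m with
    | [] => exact absurd hml hne'
    | [d] => simp [pvAFirst_eq (p :: t) m d [] hml]
    | d :: d' :: rest =>
      have hlen : (d :: d' :: rest).length > 1 := by simp
      rw [if_pos hlen]
      rw [pvAcollect]
      rw [hml]
      simp
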